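-- pv_equiv track=rewrite | github.com/gabehyman/ptrs_py | day.py | find_all_substring_is
-- ===== SOURCE A (Python) =====
-- def find_all_substring_is(ptr: str, actual_search_clauses: list[str]) -> (list[int], list[int]):
--     start_is: set = set()
--     end_is: set = set()
--
--     for clause in actual_search_clauses:
--         # start from the beginning
--         start_i = ptr.find(clause)
--
--         while start_i != -1:
--             end_i = start_i + len(clause) - 1
--             start_is.add(start_i)
--             end_is.add(end_i)
--
--             # move search forward
--             start_i = ptr.find(clause, start_i + 1)
--
--     # reverse so we can start at end and not mess up indicies before
--     return [sorted(start_is, reverse=True), sorted(end_is, reverse=True)]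
-- ===== SOURCE B (Python) =====
-- def find_all_substring_is(ptr: str, actual_search_clauses: list[str]) -> (list[int], list[int]):
--     # enumerate every start position once per clause and slice-compare,
--     # collecting (start, end) pairs in a single list
--     occ = [(i, i + len(c) - 1)
--            for c in actual_search_clauses
--            for i in range(len(ptr) - len(c) + 1)
--            if ptr[i:i + len(c)] == c]
--     return [sorted({s for s, _ in occ}, reverse=True),
--             sorted({e for _, e in occ}, reverse=True)]
-- ===== Notes on version B (the rewrite author's own statement) =====
-- stated objective: alternative
-- what changed: Replaces A's per-clause while-loop of repeated str.find(clause, start+1) calls by a single comprehension that scans every start position once per clause, slice-compares, and collects (start, end) pairs in one list before deduplicating and reverse-sorting.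
import Mathlib
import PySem

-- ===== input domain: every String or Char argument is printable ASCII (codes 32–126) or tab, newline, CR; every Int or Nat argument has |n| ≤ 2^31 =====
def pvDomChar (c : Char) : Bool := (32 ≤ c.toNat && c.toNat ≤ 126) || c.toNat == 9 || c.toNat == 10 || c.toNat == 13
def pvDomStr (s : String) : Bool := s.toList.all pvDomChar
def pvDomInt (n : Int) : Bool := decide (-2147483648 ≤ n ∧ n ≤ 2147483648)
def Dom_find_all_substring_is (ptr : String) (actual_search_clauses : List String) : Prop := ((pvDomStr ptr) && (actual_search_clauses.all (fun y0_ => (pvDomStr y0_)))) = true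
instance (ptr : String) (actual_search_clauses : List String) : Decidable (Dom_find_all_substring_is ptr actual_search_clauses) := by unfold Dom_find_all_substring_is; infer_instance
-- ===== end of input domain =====

-- B replaces A's repeated str.find scanning per clause by one comprehension over all
-- start positions with a slice comparison, collecting the (start, end) pairs in a single
-- list before deduplicating and sorting (objective: alternative; no speed claim).

-- ===== PORT A =====
-- bounds of str.find(sub, start): cited by the while-loop's termination proof below
theorem pvFindFrom_bounds (s c : List Char) (i : Int)
    (h : PySem.Chars.findFrom s c i none ≠ -1) :
    0 ≤ PySem.Chars.findFrom s c i none ∧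
    PySem.Chars.findFrom s c i none ≤ (s.length : Int) ∧
    i ≤ PySem.Chars.findFrom s c i none := by
  simp only [PySem.Chars.findFrom, Int.toNat_natCast, List.take_length] at *
  set st := (if i < 0 then if i + (s.length:Int) < 0 then 0 else i + (s.length:Int) else i) with hst
  have hst0 : 0 ≤ st ∧ i ≤ st ∧ (¬ ((s.length:Int) < st) → st ≤ s.length) := by
    rw [hst]; split_ifs <;> omega
  have h1 := PySem.Chars.neg_one_le_find (List.drop st.toNat s) c
  have h2 := PySem.Chars.find_le_length (List.drop st.toNat s) c
  simp only [List.length_drop] at h2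
  split_ifs at * <;> push_cast at * <;> omega

theorem pvFindFrom_gt_len (s c : List Char) (i : Int) (h : (s.length : Int) < i) :
    PySem.Chars.findFrom s c i none = -1 := by
  simp only [PySem.Chars.findFrom]
  split_ifs <;> first | rfl | omega

-- the while-loop of A: repeated ptr.find(clause, start_i + 1) until it returns -1
def pvALoop (ptr clause : String) (startI : Int) (startIs endIs : PySem.Set Int) :
    PySem.Set Int × PySem.Set Int :=
  if startI = -1 then (startIs, endIs)
  else
    pvALoop ptr clause (PySem.Str.findFrom ptr clause (startI + 1) none)
      (PySem.Set.add startIs startI)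
      (PySem.Set.add endIs (startI + PySem.Str.len clause - 1))
termination_by (if startI = -1 then 0
  else if startI ≤ (ptr.toList.length : Int) then ((ptr.toList.length : Int) + 2 - startI).toNat
  else 1 : Nat)
decreasing_by
  rename_i h
  rw [PySem.Str.findFrom_eq]
  by_cases hr : PySem.Chars.findFrom ptr.toList clause.toList (startI + 1) none = -1
  · simp only [hr]
    split_ifs <;> omega
  · have hb := pvFindFrom_bounds ptr.toList clause.toList (startI + 1) hr
    by_cases hle : startI ≤ (ptr.toList.length : Int)
    · split_ifs <;> omega
    · exact absurd (pvFindFrom_gt_len ptr.toList clause.toList (startI + 1) (by omega)) hr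

def find_all_substring_is (ptr : String) (actual_search_clauses : List String) : List (List Int) :=
  let se := actual_search_clauses.foldl
    (fun (se : PySem.Set Int × PySem.Set Int) clause =>
      pvALoop ptr clause (PySem.Str.find ptr clause) se.1 se.2)
    (PySem.Set.empty, PySem.Set.empty)
  [PySem.List.sorted se.1 (fun x => x) true, PySem.List.sorted se.2 (fun x => x) true]

-- ===== PORT B =====
-- the (start, end) pairs of every clause occurrence, by scanning all start positions
def pvOccList (ptr : String) (actual_search_clauses : List String) : List (Int × Int) :=
  actual_search_clauses.flatMap (fun c =>
    ((PySem.List.pyRange 0 (PySem.Str.len ptr - PySem.Str.len c + 1) 1).filter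
        (fun i => PySem.Str.slice ptr (some i) (some (i + PySem.Str.len c)) = c)).map
      (fun i => (i, i + PySem.Str.len c - 1)))

def find_all_substring_is_alt (ptr : String) (actual_search_clauses : List String) : List (List Int) :=
  let occ := pvOccList ptr actual_search_clauses
  [PySem.List.sorted (PySem.Set.ofList (occ.map Prod.fst)) (fun x => x) true,
   PySem.List.sorted (PySem.Set.ofList (occ.map Prod.snd)) (fun x => x) true]

-- ===== PRECONDITION & SPEC =====
def Spec_find_all_substring_is (ptr : String) (actual_search_clauses : List String) (out : List (List Int)) : Prop := out = find_all_substring_is_alt ptr actual_search_clauses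
instance (ptr : String) (actual_search_clauses : List String) (out : List (List Int)) : Decidable (Spec_find_all_substring_is ptr actual_search_clauses out) := by unfold Spec_find_all_substring_is; infer_instance

-- ===== CLAIM (what is proved, stated in full; the proofs are below) =====
def Claim_equal_find_all_substring_is : Prop := ∀ (ptr : String) (actual_search_clauses : List String), Dom_find_all_substring_is ptr actual_search_clauses → Spec_find_all_substring_is ptr actual_search_clauses (find_all_substring_is ptr actual_search_clauses)

-- ===== LEMMAS AND PROOFS =====

-- clause occurs in ptr at (Nat) position j
def pvOccAt (s c : List Char) (j : Nat) : Prop := j ≤ s.length ∧ c <+: List.drop j s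

-- A's while-loop collects exactly the occurrence positions ≥ k (strong induction on length+1-k)
theorem pvALoop_char (ptr clause : String) (k : Nat) (hk : k ≤ ptr.toList.length + 1)
    (S E : PySem.Set Int) :
    (S.Nodup → (pvALoop ptr clause (PySem.Chars.findFrom ptr.toList clause.toList (k : Int) none) S E).1.Nodup) ∧
    (E.Nodup → (pvALoop ptr clause (PySem.Chars.findFrom ptr.toList clause.toList (k : Int) none) S E).2.Nodup) ∧
    (∀ x, x ∈ (pvALoop ptr clause (PySem.Chars.findFrom ptr.toList clause.toList (k : Int) none) S E).1 ↔
        x ∈ S ∨ ∃ j : Nat, k ≤ j ∧ pvOccAt ptr.toList clause.toList j ∧ x = (j : Int)) ∧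
    (∀ x, x ∈ (pvALoop ptr clause (PySem.Chars.findFrom ptr.toList clause.toList (k : Int) none) S E).2 ↔
        x ∈ E ∨ ∃ j : Nat, k ≤ j ∧ pvOccAt ptr.toList clause.toList j ∧
          x = (j : Int) + (clause.toList.length : Int) - 1) := by
  by_cases hr : PySem.Chars.findFrom ptr.toList clause.toList (k : Int) none = -1
  · rw [pvALoop, if_pos hr]
    have hnone : ∀ j : Nat, k ≤ j → ¬ pvOccAt ptr.toList clause.toList j := by
      rintro j hkj ⟨hjle, hpre⟩
      by_cases hk2 : k ≤ ptr.toList.length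
      · have hninf := (PySem.Chars.findFrom_natCast_eq_neg_one_iff ptr.toList clause.toList k hk2).mp hr
        apply hninf
        have hsub : List.drop j ptr.toList = List.drop (j - k) (List.drop k ptr.toList) := by
          rw [List.drop_drop]; congr 1; omega
        rw [hsub] at hpre
        exact hpre.isInfix.trans (List.drop_suffix _ _).isInfix
      · omega
    refine ⟨fun h => h, fun h => h, ?_, ?_⟩ <;> intro x <;>
      exact ⟨fun h => Or.inl h,
             fun h => h.elim id (fun ⟨j, hj, hocc, _⟩ => absurd hocc (hnone j hj))⟩
  · have hb := pvFindFrom_bounds ptr.toList clause.toList (k : Int) hr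
    have hk2 : k ≤ ptr.toList.length := by
      by_contra hgt
      exact hr (pvFindFrom_gt_len ptr.toList clause.toList (k : Int) (by omega))
    have hspec := PySem.Chars.findFrom_natCast_spec ptr.toList clause.toList k hk2 hr
    set r := PySem.Chars.findFrom ptr.toList clause.toList (k : Int) none with hrdef
    have hj0 : ((r.toNat : Nat) : Int) = r := Int.toNat_of_nonneg hb.1
    have hcast : r + 1 = ((r.toNat + 1 : Nat) : Int) := by omega
    have hrec : PySem.Str.findFrom ptr clause (r + 1) none
        = PySem.Chars.findFrom ptr.toList clause.toList ((r.toNat + 1 : Nat) : Int) none := by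
      rw [PySem.Str.findFrom_eq, hcast]
    rw [pvALoop, if_neg hr, hrec]
    have IH := pvALoop_char ptr clause (r.toNat + 1) (by omega)
      (PySem.Set.add S r) (PySem.Set.add E (r + PySem.Str.len clause - 1))
    obtain ⟨IH1, IH2, IH3, IH4⟩ := IH
    have hocc0 : pvOccAt ptr.toList clause.toList r.toNat := ⟨by omega, hspec.2.1⟩
    have hsplit : ∀ j : Nat, k ≤ j → pvOccAt ptr.toList clause.toList j →
        (j = r.toNat ∨ r.toNat + 1 ≤ j) := by
      intro j hkj hocc
      by_contra hcon
      push Not at hcon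
      exact hspec.2.2 j hkj (by omega) hocc.2
    refine ⟨?_, ?_, ?_, ?_⟩
    · intro hS; exact IH1 (PySem.Set.nodup_add S r hS)
    · intro hE; exact IH2 (PySem.Set.nodup_add E _ hE)
    · intro x
      rw [IH3 x, PySem.Set.mem_add]
      constructor
      · rintro ((h | h) | ⟨j, hj, hocc, hx⟩)
        · exact Or.inl h
        · exact Or.inr ⟨r.toNat, by omega, hocc0, by omega⟩
        · exact Or.inr ⟨j, by omega, hocc, hx⟩
      · rintro (h | ⟨j, hj, hocc, hx⟩)
        · exact Or.inl (Or.inl h)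
        · rcases hsplit j hj hocc with h1 | h1
          · subst h1; exact Or.inl (Or.inr (by omega))
          · exact Or.inr ⟨j, h1, hocc, hx⟩
    · intro x
      rw [IH4 x, PySem.Set.mem_add]
      simp only [PySem.Str.len_eq]
      constructor
      · rintro ((h | h) | ⟨j, hj, hocc, hx⟩)
        · exact Or.inl h
        · exact Or.inr ⟨r.toNat, by omega, hocc0, by omega⟩
        · exact Or.inr ⟨j, by omega, hocc, hx⟩
      · rintro (h | ⟨j, hj, hocc, hx⟩)
        · exact Or.inl (Or.inl h)
        · rcases hsplit j hj hocc with h1 | h1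
          · subst h1; exact Or.inl (Or.inr (by omega))
          · exact Or.inr ⟨j, h1, hocc, hx⟩
termination_by ptr.toList.length + 1 - k
decreasing_by omega

-- A's fold over the clauses
theorem pvFold_char (ptr : String) (cls : List String) (S E : PySem.Set Int)
    (hS : S.Nodup) (hE : E.Nodup) :
    (cls.foldl (fun (se : PySem.Set Int × PySem.Set Int) clause =>
        pvALoop ptr clause (PySem.Str.find ptr clause) se.1 se.2) (S, E)).1.Nodup ∧
    (cls.foldl (fun (se : PySem.Set Int × PySem.Set Int) clause =>
        pvALoop ptr clause (PySem.Str.find ptr clause) se.1 se.2) (S, E)).2.Nodup ∧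
    (∀ x, x ∈ (cls.foldl (fun (se : PySem.Set Int × PySem.Set Int) clause =>
        pvALoop ptr clause (PySem.Str.find ptr clause) se.1 se.2) (S, E)).1 ↔
      x ∈ S ∨ ∃ c ∈ cls, ∃ j : Nat, pvOccAt ptr.toList c.toList j ∧ x = (j : Int)) ∧
    (∀ x, x ∈ (cls.foldl (fun (se : PySem.Set Int × PySem.Set Int) clause =>
        pvALoop ptr clause (PySem.Str.find ptr clause) se.1 se.2) (S, E)).2 ↔
      x ∈ E ∨ ∃ c ∈ cls, ∃ j : Nat, pvOccAt ptr.toList c.toList j ∧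
        x = (j : Int) + (c.toList.length : Int) - 1) := by
  induction cls generalizing S E with
  | nil => simp [hS, hE]
  | cons c0 rest ih =>
    simp only [List.foldl_cons]
    have hfind : PySem.Str.find ptr c0
        = PySem.Chars.findFrom ptr.toList c0.toList ((0 : Nat) : Int) none := by
      rw [PySem.Str.find_eq, ← PySem.Chars.findFrom_zero]
      norm_num
    rw [hfind]
    obtain ⟨hA1, hA2, hA3, hA4⟩ := pvALoop_char ptr c0 0 (by omega) S E
    obtain ⟨hB1, hB2, hB3, hB4⟩ := ih _ _ (hA1 hS) (hA2 hE)
    refine ⟨hB1, hB2, ?_, ?_⟩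
    · intro x
      refine Iff.trans (hB3 x) ?_
      rw [hA3 x]
      simp only [List.mem_cons]
      constructor
      · rintro ((h | ⟨j, _, hocc, hx⟩) | ⟨c, hc, j, hocc, hx⟩)
        · exact Or.inl h
        · exact Or.inr ⟨c0, Or.inl rfl, j, hocc, hx⟩
        · exact Or.inr ⟨c, Or.inr hc, j, hocc, hx⟩
      · rintro (h | ⟨c, (rfl | hc), j, hocc, hx⟩)
        · exact Or.inl (Or.inl h)
        · exact Or.inl (Or.inr ⟨j, by omega, hocc, hx⟩)
        · exact Or.inr ⟨c, hc, j, hocc, hx⟩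
    · intro x
      refine Iff.trans (hB4 x) ?_
      rw [hA4 x]
      simp only [List.mem_cons]
      constructor
      · rintro ((h | ⟨j, _, hocc, hx⟩) | ⟨c, hc, j, hocc, hx⟩)
        · exact Or.inl h
        · exact Or.inr ⟨c0, Or.inl rfl, j, hocc, hx⟩
        · exact Or.inr ⟨c, Or.inr hc, j, hocc, hx⟩
      · rintro (h | ⟨c, (rfl | hc), j, hocc, hx⟩)
        · exact Or.inl (Or.inl h)
        · exact Or.inl (Or.inr ⟨j, by omega, hocc, hx⟩)
        · exact Or.inr ⟨c, hc, j, hocc, hx⟩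

-- B's per-position test is exactly "occurrence at this position"
theorem pvScan_iff (ptr c : String) (i : Int) :
    (i ∈ PySem.List.pyRange 0 (PySem.Str.len ptr - PySem.Str.len c + 1) 1 ∧
      PySem.Str.slice ptr (some i) (some (i + PySem.Str.len c)) = c) ↔
    ∃ j : Nat, pvOccAt ptr.toList c.toList j ∧ i = (j : Int) := by
  rw [PySem.List.mem_pyRange_one]
  simp only [PySem.Str.len_eq]
  constructor
  · rintro ⟨⟨h0, hlt⟩, hsl⟩
    refine ⟨i.toNat, ⟨by omega, ?_⟩, by omega⟩
    have hsl' : (PySem.Str.slice ptr (some i) (some (i + (c.toList.length : Int)))).toList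
        = c.toList := by rw [hsl]
    simp only [PySem.Str.slice, String.toList_ofList, PySem.Chars.slice] at hsl'
    rw [PySem.List.slice_toNat _ h0 (by omega)] at hsl'
    have harith : (i + (c.toList.length : Int)).toNat - i.toNat = c.toList.length := by omega
    rw [harith] at hsl'
    exact List.prefix_iff_eq_take.mpr hsl'.symm
  · rintro ⟨j, ⟨hjle, hpre⟩, rfl⟩
    have hm : c.toList.length ≤ ptr.toList.length - j := by
      have := hpre.length_le
      simpa [List.length_drop] using this
    refine ⟨⟨by omega, by omega⟩, ?_⟩
    rw [← String.toList_inj]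
    simp only [PySem.Str.slice, String.toList_ofList, PySem.Chars.slice]
    rw [PySem.List.slice_toNat _ (by omega) (by omega)]
    have harith : ((j : Int) + (c.toList.length : Int)).toNat - ((j : Int)).toNat
        = c.toList.length := by omega
    rw [harith, Int.toNat_natCast]
    exact (List.prefix_iff_eq_take.mp hpre).symm

-- B's start / end components, as occurrence predicates
theorem pvAlt_starts_mem (ptr : String) (cls : List String) (x : Int) :
    x ∈ (pvOccList ptr cls).map Prod.fst ↔
      ∃ c ∈ cls, ∃ j : Nat, pvOccAt ptr.toList c.toList j ∧ x = (j : Int) := by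
  simp only [pvOccList, List.mem_map, List.mem_flatMap, List.mem_filter,
    decide_eq_true_eq]
  constructor
  · rintro ⟨a, ⟨c, hc, ⟨i, hi, rfl⟩⟩, hfst⟩
    obtain ⟨j, hocc, rfl⟩ := (pvScan_iff ptr c i).mp ⟨hi.1, hi.2⟩
    exact ⟨c, hc, j, hocc, by simpa using hfst.symm⟩
  · rintro ⟨c, hc, j, hocc, rfl⟩
    have hi := (pvScan_iff ptr c (j : Int)).mpr ⟨j, hocc, rfl⟩
    exact ⟨((j : Int), (j : Int) + PySem.Str.len c - 1), ⟨c, hc, (j : Int), ⟨hi.1, hi.2⟩, rfl⟩, rfl⟩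

theorem pvAlt_ends_mem (ptr : String) (cls : List String) (x : Int) :
    x ∈ (pvOccList ptr cls).map Prod.snd ↔
      ∃ c ∈ cls, ∃ j : Nat, pvOccAt ptr.toList c.toList j ∧
        x = (j : Int) + (c.toList.length : Int) - 1 := by
  simp only [pvOccList, List.mem_map, List.mem_flatMap, List.mem_filter,
    decide_eq_true_eq]
  constructor
  · rintro ⟨a, ⟨c, hc, ⟨i, hi, rfl⟩⟩, hsnd⟩
    obtain ⟨j, hocc, rfl⟩ := (pvScan_iff ptr c i).mp ⟨hi.1, hi.2⟩
    refine ⟨c, hc, j, hocc, ?_⟩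
    rw [← hsnd]
    simp [PySem.Str.len_eq]
  · rintro ⟨c, hc, j, hocc, rfl⟩
    have hi := (pvScan_iff ptr c (j : Int)).mpr ⟨j, hocc, rfl⟩
    refine ⟨((j : Int), (j : Int) + PySem.Str.len c - 1), ⟨c, hc, (j : Int), ⟨hi.1, hi.2⟩, rfl⟩, ?_⟩
    simp [PySem.Str.len_eq]

-- two nodup lists with the same members have the same reverse-sorted order
theorem pvSortedRev_congr (xs ys : List Int) (hx : xs.Nodup) (hy : ys.Nodup)
    (h : ∀ x, x ∈ xs ↔ x ∈ ys) :
    PySem.List.sorted xs (fun x => x) true = PySem.List.sorted ys (fun x => x) true := by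
  have hperm : (PySem.List.sorted xs (fun x => x) true).Perm xs :=
    PySem.List.sorted_perm xs _ true
  have hzn : (PySem.List.sorted xs (fun x => x) true).Nodup := hperm.nodup_iff.mpr hx
  have hle := PySem.List.sorted_pairwise_rev xs (fun x => x)
  have hne : (PySem.List.sorted xs (fun x => x) true).Pairwise (fun a b : Int => a ≠ b) := hzn
  have hlt : (PySem.List.sorted xs (fun x => x) true).Pairwise (fun a b : Int => b < a) :=
    (hle.and hne).imp (fun hab => lt_of_le_of_ne hab.1 (Ne.symm hab.2))
  exact (PySem.List.sorted_rev_eq_of_perm_of_pairwise_gt ys _ (fun x => x)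
    (hperm.trans ((List.perm_ext_iff_of_nodup hx hy).mpr h)) hlt).symm

-- ===== VERDICT (by name: the statement is the Claim_ definition above) =====
theorem find_all_substring_is_spec : Claim_equal_find_all_substring_is := by
  intro ptr cls _
  unfold Spec_find_all_substring_is find_all_substring_is find_all_substring_is_alt
  obtain ⟨h1, h2, h3, h4⟩ := pvFold_char ptr cls PySem.Set.empty PySem.Set.empty
    List.nodup_nil List.nodup_nil
  refine List.cons_eq_cons.mpr ⟨?_, List.cons_eq_cons.mpr ⟨?_, rfl⟩⟩
  · apply pvSortedRev_congr _ _ h1 (PySem.Set.nodup_ofList _)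
    intro x
    rw [h3 x, PySem.Set.mem_ofList, pvAlt_starts_mem]
    simp [PySem.Set.empty]
  · apply pvSortedRev_congr _ _ h2 (PySem.Set.nodup_ofList _)
    intro x
    rw [h4 x, PySem.Set.mem_ofList, pvAlt_ends_mem]
    simp [PySem.Set.empty]
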